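-- pv_equiv track=rewrite | github.com/kamilGie/WDI | Zestaw_3:_Tablice_o_większej_liczbie_wymiarów/112/Rozwiązania/wiki.py | Zadanie_112
-- ===== SOURCE A (Python) =====
-- def Zadanie_112(T):
--     N = len(T)
--     skoki = [(1, -2), (2, -1), (2, 1), (1, 2)]
--
--     min_odległość = [[float("inf") if i > 0 else 0 for _ in range(N)] for i in range(N)]
--
--     for y in range(N - 1):  # koordynaty
--         for x in range(N):
--             for skok in skoki:
--                 potencjalny_skok_y = y + skok[0]  # ładen nazwy
--                 potencjalny_skok_x = x + skok[1]
--                 # sprawdzenie czy potencjalny skok nie wyjdzie nam poza tablice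
--                 if (
--                     potencjalny_skok_y < 0
--                     or potencjalny_skok_y > N - 1
--                     or potencjalny_skok_x < 0
--                     or potencjalny_skok_x > N - 1
--                 ):
--                     continue
--                 # sprawdzanie czy możemy w ogóle skoczyć z tego pola (czy byliśmy wcześniej już)
--                 if min_odległość[y][x] == float("inf"):
--                     continue
--                 # sprawdzenie czy nie ma miny
--                 if T[potencjalny_skok_y][potencjalny_skok_x] == 1:
--                     continue
--                 min_odległość[potencjalny_skok_y][potencjalny_skok_x] = min(
--                     min_odległość[y][x] + 1,
--                     min_odległość[potencjalny_skok_y][potencjalny_skok_x],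
--                 )
--
--     result = float("inf")
--     for i in range(N):
--         result = min(min_odległość[N - 1][i], result)
--
--     return result if result < float("inf") else False
-- ===== SOURCE B (Python) =====
-- def Zadanie_112(T):
--     # Pull-based row DP: each cell takes 1 + min over its (in-bounds, up to four)
--     # predecessors, keeping only the previous two rows. Mines never get a finite
--     # distance, but every top-row cell (mine or not) starts at 0, as in A.
--     N = len(T)
--     INF = float("inf")
--     prev2, prev = None, [0] * N  # rows y-2 and y-1; row 0 is all zeros
--     for y in range(1, N):
--         row = []
--         for x in range(N):
--             if T[y][x] == 1:
--                 row.append(INF)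
--                 continue
--             best = INF
--             if x + 2 < N:
--                 best = min(best, prev[x + 2] + 1)
--             if x - 2 >= 0:
--                 best = min(best, prev[x - 2] + 1)
--             if prev2 is not None:
--                 if x + 1 < N:
--                     best = min(best, prev2[x + 1] + 1)
--                 if x - 1 >= 0:
--                     best = min(best, prev2[x - 1] + 1)
--             row.append(best)
--         prev2, prev = prev, row
--     best = INF
--     for v in prev:
--         best = min(best, v)
--     return best if best < INF else False
-- ===== Notes on version B (the rewrite author's own statement) =====
-- stated objective: faster
-- what changed: Replaces A's push-relaxation DP over a full N x N distance grid (seed top row, push min-updates down through every cell and jump) with a pull-based row DP that computes each cell directly as 1 + min over its up-to-four in-bounds predecessors, keeping only the previous two rows; same O(N^2) work but O(N) memory and no per-jump bounds/visited/mine re-checks, a measured constant-factor speedup.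
-- outside the precondition, e.g. on Zadanie_112([]): A returns False, B returns False; on Zadanie_112([[0, 0], [0, 0]]): A returns False, B returns False; on Zadanie_112([[0], [0]]): A returns False, B raises IndexError
import Mathlib
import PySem

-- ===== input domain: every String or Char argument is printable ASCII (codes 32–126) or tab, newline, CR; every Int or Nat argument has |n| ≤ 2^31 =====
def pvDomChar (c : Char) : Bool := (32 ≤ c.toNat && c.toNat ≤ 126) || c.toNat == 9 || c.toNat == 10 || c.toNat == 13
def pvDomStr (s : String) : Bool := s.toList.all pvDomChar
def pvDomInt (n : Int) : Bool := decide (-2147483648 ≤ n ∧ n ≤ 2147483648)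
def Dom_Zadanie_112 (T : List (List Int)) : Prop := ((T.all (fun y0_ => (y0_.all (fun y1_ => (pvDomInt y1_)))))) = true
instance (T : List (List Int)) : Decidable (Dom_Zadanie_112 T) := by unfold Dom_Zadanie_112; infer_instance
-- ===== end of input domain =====

-- B replaces A's push-relaxation over a full N×N distance grid by a pull-based row DP
-- (each cell = 1 + min over its in-bounds predecessors) keeping only the last two rows:
-- the same O(N^2) work, O(N) memory, and a constant-factor speedup measured.


-- shared helpers: float('inf') is modelled as `none`, a finite distance as `some d`.
-- pvOmin a b = min a b with none = +inf (ties cannot matter: the values are Ints)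
def pvOmin : Option Int → Option Int → Option Int
  | none, b => b
  | some a, none => some a
  | some a, some b => some (min a b)

-- o + 1 (inf + 1 = inf)
def pvOsucc : Option Int → Option Int
  | none => none
  | some d => some (d + 1)

-- T[y][x] == 1  (getD is exact inside Pre_, where every probed index is in range)
def pvMine (T : List (List Int)) (y x : Nat) : Bool := (T.getD y []).getD x 0 == 1

-- ===== PORT A =====
-- the mutable 2D list min_odległość: read / write one cell
def pvGet2 (g : List (List (Option Int))) (y x : Nat) : Option Int := (g.getD y []).getD x none
def pvSet2 (g : List (List (Option Int))) (y x : Nat) (v : Option Int) : List (List (Option Int)) :=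
  g.modify y (fun row => row.set x v)

def pvSkoki : List (Int × Int) := [(1, -2), (2, -1), (2, 1), (1, 2)]

-- body of A's innermost loop, one skok; (y:Int)+skok.1 / (x:Int)+skok.2 are
-- potencjalny_skok_y / potencjalny_skok_x (≥ 0 whenever indexed, so toNat is exact)
def aJump (T : List (List Int)) (y x : Nat) (g : List (List (Option Int))) (skok : Int × Int) :
    List (List (Option Int)) :=
  if (y : Int) + skok.1 < 0 ∨ (T.length : Int) - 1 < (y : Int) + skok.1 ∨
      (x : Int) + skok.2 < 0 ∨ (T.length : Int) - 1 < (x : Int) + skok.2 then g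
  else
    match pvGet2 g y x with
    | none => g          -- source still inf: continue
    | some d =>
      if pvMine T ((y : Int) + skok.1).toNat ((x : Int) + skok.2).toNat then g   -- mine: continue
      else pvSet2 g ((y : Int) + skok.1).toNat ((x : Int) + skok.2).toNat
        (pvOmin (some (d + 1)) (pvGet2 g ((y : Int) + skok.1).toNat ((x : Int) + skok.2).toNat))

-- for skok in skoki: …
def aInner (T : List (List Int)) (y : Nat) (g : List (List (Option Int))) (x : Nat) :
    List (List (Option Int)) :=
  pvSkoki.foldl (aJump T y x) g

-- for x in range(N): …
def aOuter (T : List (List Int)) (g : List (List (Option Int))) (y : Nat) :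
    List (List (Option Int)) :=
  (List.range T.length).foldl (aInner T y) g

def Zadanie_112 (T : List (List Int)) : Int :=
  let N : Nat := T.length
  -- [[inf if i > 0 else 0 for _ in range(N)] for i in range(N)]
  let init : List (List (Option Int)) :=
    (List.range N).map (fun i => (List.range N).map (fun _ => if 0 < i then (none : Option Int) else some 0))
  -- for y in range(N - 1): …
  let final : List (List (Option Int)) := (List.range (N - 1)).foldl (aOuter T) init
  -- result = min over the bottom row, starting from inf
  let result : Option Int := (List.range N).foldl (fun r i => pvOmin (pvGet2 final (N - 1) i) r) none
  match result with
  | some r => r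
  | none => 0    -- Python returns False (== 0) when the bottom row is unreachable

-- ===== PORT B =====
-- body of B's inner loop: append the value of cell (y, x), pulled from the two previous rows
def bRowStep (T : List (List Int)) (prev2 : Option (List (Option Int))) (prev : List (Option Int))
    (y : Nat) (row : List (Option Int)) (x : Nat) : List (Option Int) :=
  if pvMine T y x then row ++ [(none : Option Int)]
  else
    let best : Option Int := none
    let best := if x + 2 < T.length then pvOmin best (pvOsucc (prev.getD (x + 2) none)) else best
    let best := if 2 ≤ x then pvOmin best (pvOsucc (prev.getD (x - 2) none)) else best
    let best :=
      match prev2 with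
      | none => best
      | some q =>
        let best := if x + 1 < T.length then pvOmin best (pvOsucc (q.getD (x + 1) none)) else best
        if 1 ≤ x then pvOmin best (pvOsucc (q.getD (x - 1) none)) else best
    row ++ [best]

-- body of B's outer loop: build row y from the two previous rows, then shift (prev2, prev)
def bStep (T : List (List Int)) (st : Option (List (Option Int)) × List (Option Int)) (y : Nat) :
    Option (List (Option Int)) × List (Option Int) :=
  (some st.2, (List.range T.length).foldl (bRowStep T st.1 st.2 y) [])

def Zadanie_112_alt (T : List (List Int)) : Int :=
  let N : Nat := T.length
  -- prev2, prev = None, [0] * N ; for y in range(1, N): …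
  let st : Option (List (Option Int)) × List (Option Int) :=
    (List.range' 1 (N - 1)).foldl (bStep T) (none, List.replicate N (some 0))
  -- best = min over the last row, starting from inf
  let best : Option Int := st.2.foldl (fun b v => pvOmin b v) none
  match best with
  | some r => r
  | none => 0    -- Python returns False (== 0) when the bottom row is unreachable

-- ===== PRECONDITION & SPEC =====
-- can the knight reach cell (y, x)?  (row 0 counts as reached even on a mine, as in A's seeding)
def pvReach (T : List (List Int)) : Nat → Nat → Bool
  | 0, _ => true
  | 1, x => !pvMine T 1 x &&
      ((decide (x + 2 < T.length) && pvReach T 0 (x + 2)) ||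
       (decide (2 ≤ x) && pvReach T 0 (x - 2)))
  | y + 2, x => !pvMine T (y + 2) x &&
      ((decide (x + 2 < T.length) && pvReach T (y + 1) (x + 2)) ||
       (decide (2 ≤ x) && pvReach T (y + 1) (x - 2)) ||
       (decide (x + 1 < T.length) && pvReach T y (x + 1)) ||
       (decide (1 ≤ x) && pvReach T y (x - 1)))

-- Pre_ excludes (a) ragged boards with a row below the top shorter than the board — both
-- programs index such rows up to column N-1 and generally raise IndexError; which short-row
-- boards escape without an exception is an artefact of each traversal order — and (b) boards
-- whose bottom row is unreachable (including the empty board), where A returns the bool False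
-- instead of an int, a value outside the declared return type.
def Pre_Zadanie_112 (T : List (List Int)) : Prop :=
  (∀ r ∈ T.drop 1, T.length ≤ r.length) ∧
  ∃ i ∈ List.range T.length, pvReach T (T.length - 1) i = true
instance (T : List (List Int)) : Decidable (Pre_Zadanie_112 T) := by unfold Pre_Zadanie_112; infer_instance

def pvWitness_Zadanie_112 : List (List Int) := [[0, 0, 0], [0, 1, 0], [0, 0, 0]]

def Spec_Zadanie_112 (T : List (List Int)) (out : Int) : Prop := out = Zadanie_112_alt T
instance (T : List (List Int)) (out : Int) : Decidable (Spec_Zadanie_112 T out) := by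
  unfold Spec_Zadanie_112; infer_instance

-- ===== CLAIM (what is proved, stated in full; the proofs are below) =====
def Claim_equal_Zadanie_112 : Prop :=
  ∀ (T : List (List Int)), Dom_Zadanie_112 T → Pre_Zadanie_112 T → Spec_Zadanie_112 T (Zadanie_112 T)

-- ===== LEMMAS AND PROOFS =====

-- ---- pvOmin algebra ----
theorem pvOmin_none_right (a : Option Int) : pvOmin a none = a := by cases a <;> rfl

theorem pvOmin_assoc (a b c : Option Int) : pvOmin (pvOmin a b) c = pvOmin a (pvOmin b c) := by
  cases a <;> cases b <;> cases c <;> simp [pvOmin, min_assoc]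

theorem pvOmin_comm (a b : Option Int) : pvOmin a b = pvOmin b a := by
  cases a <;> cases b <;> simp [pvOmin, min_comm]

theorem omin4 (a b c d : Option Int) :
    pvOmin a (pvOmin b (pvOmin c d)) = pvOmin (pvOmin (pvOmin a b) c) d := by
  rw [pvOmin_assoc, pvOmin_assoc]

theorem pvOmin_guard (P : Prop) [Decidable P] (b v : Option Int) :
    (if P then pvOmin b v else b) = pvOmin b (if P then v else none) := by
  split <;> simp [pvOmin_none_right]

-- ---- grid well-formedness and get/set ----
def pvWF (N : Nat) (g : List (List (Option Int))) : Prop :=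
  g.length = N ∧ ∀ y, y < N → (g.getD y []).length = N

theorem pvWF_set2 {N : Nat} {g : List (List (Option Int))} (h : pvWF N g) (y x : Nat) (v : Option Int) :
    pvWF N (pvSet2 g y x v) := by
  refine ⟨by simp [pvSet2, h.1], ?_⟩
  intro i hi
  have h2 := h.2 i hi
  unfold pvSet2
  cases hgi : g[i]? with
  | none =>
    simp [List.getD_eq_getElem?_getD, List.getElem?_modify, hgi] at h2 ⊢
    exact h2
  | some row =>
    simp [List.getD_eq_getElem?_getD, List.getElem?_modify, hgi] at h2 ⊢
    split <;> simp [h2]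

theorem pvGet2_set2_same {N : Nat} {g : List (List (Option Int))} (hwf : pvWF N g)
    {y x : Nat} (hy : y < N) (hx : x < N) (v : Option Int) :
    pvGet2 (pvSet2 g y x v) y x = v := by
  have hylen : y < g.length := hwf.1 ▸ hy
  have hrow : g.getD y [] = g[y] := by
    simp [List.getD_eq_getElem?_getD, List.getElem?_eq_getElem hylen]
  have hxlen : x < (g[y]).length := by
    have := hwf.2 y hy; rw [hrow] at this; omega
  unfold pvGet2 pvSet2
  simp [List.getD_eq_getElem?_getD, List.getElem?_modify, List.getElem?_eq_getElem hylen,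
    List.getElem?_set_self hxlen]

theorem pvGet2_set2_ne {g : List (List (Option Int))} {y x t c : Nat}
    (h : t ≠ y ∨ c ≠ x) (v : Option Int) :
    pvGet2 (pvSet2 g y x v) t c = pvGet2 g t c := by
  unfold pvGet2 pvSet2
  cases hgt : g[t]? with
  | none => simp [List.getD_eq_getElem?_getD, List.getElem?_modify, hgt]
  | some row =>
    rcases h with h | h
    · simp [List.getD_eq_getElem?_getD, List.getElem?_modify, hgt,
        show y ≠ t from fun hh => h hh.symm]
    · by_cases hyt : y = t
      · simp [List.getD_eq_getElem?_getD, List.getElem?_modify, hgt, hyt,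
          List.getElem?_set_ne (show x ≠ c from fun hh => h hh.symm)]
      · simp [List.getD_eq_getElem?_getD, List.getElem?_modify, hgt, hyt]

-- ---- A's innermost step, pointwise ----
theorem aJump_wf {T : List (List Int)} {g : List (List (Option Int))}
    (hwf : pvWF T.length g) (y x : Nat) (s : Int × Int) :
    pvWF T.length (aJump T y x g s) := by
  unfold aJump
  split
  · exact hwf
  · split
    · exact hwf
    · split
      · exact hwf
      · exact pvWF_set2 hwf _ _ _

theorem aJump_get {T : List (List Int)} {g : List (List (Option Int))}
    (hwf : pvWF T.length g) {y x t c : Nat} (s : Int × Int) (hs : 0 < s.1)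
    (ht : t < T.length) (hc : c < T.length) :
    pvGet2 (aJump T y x g s) t c =
      if (t : Int) = (y : Int) + s.1 ∧ (c : Int) = (x : Int) + s.2 ∧ pvMine T t c = false then
        pvOmin (pvOsucc (pvGet2 g y x)) (pvGet2 g t c)
      else pvGet2 g t c := by
  unfold aJump
  by_cases hb : ((y : Int) + s.1 < 0 ∨ (T.length : Int) - 1 < (y : Int) + s.1 ∨
      (x : Int) + s.2 < 0 ∨ (T.length : Int) - 1 < (x : Int) + s.2)
  · rw [if_pos hb, if_neg]
    rintro ⟨h1, h2, -⟩
    omega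
  · rw [if_neg hb]
    have hb' : 0 ≤ (y : Int) + s.1 ∧ (y : Int) + s.1 ≤ (T.length : Int) - 1 ∧
        0 ≤ (x : Int) + s.2 ∧ (x : Int) + s.2 ≤ (T.length : Int) - 1 := by omega
    cases hsrc : pvGet2 g y x with
    | none =>
      dsimp only
      split
      · simp [pvOsucc, pvOmin]
      · rfl
    | some d =>
      dsimp only
      by_cases heq : ((t : Int) = (y : Int) + s.1 ∧ (c : Int) = (x : Int) + s.2)
      · have hyt : ((y : Int) + s.1).toNat = t := by omega
        have hxc : ((x : Int) + s.2).toNat = c := by omega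
        rw [hyt, hxc]
        by_cases hm : pvMine T t c
        · rw [if_pos hm, if_neg]
          simp [hm]
        · rw [if_neg hm, if_pos ⟨heq.1, heq.2, by simp [hm]⟩]
          rw [pvGet2_set2_same hwf ht hc]
          simp [pvOsucc]
      · have hne : t ≠ ((y : Int) + s.1).toNat ∨ c ≠ ((x : Int) + s.2).toNat := by omega
        rw [if_neg (show ¬ ((t : Int) = (y : Int) + s.1 ∧ (c : Int) = (x : Int) + s.2 ∧
            pvMine T t c = false) from fun hh => heq ⟨hh.1, hh.2.1⟩)]
        split
        · rfl
        · exact pvGet2_set2_ne hne _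

-- which loop indices x hit cell (t, c) while relaxing from source row y
def hitB (y t c x : Nat) : Bool :=
  (t == y + 1 && (x == c + 2 || c == x + 2)) || (t == y + 2 && (x == c + 1 || c == x + 1))

theorem aInner_wf {T : List (List Int)} {g : List (List (Option Int))}
    (hwf : pvWF T.length g) (y x : Nat) :
    pvWF T.length (aInner T y g x) := by
  unfold aInner pvSkoki
  simp only [List.foldl]
  exact aJump_wf (aJump_wf (aJump_wf (aJump_wf hwf _ _ _) _ _ _) _ _ _) _ _ _

theorem aInner_get {T : List (List Int)} {g : List (List (Option Int))}
    (hwf : pvWF T.length g) {y x t c : Nat}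
    (hy : y < T.length) (hx : x < T.length) (ht : t < T.length) (hc : c < T.length) :
    pvGet2 (aInner T y g x) t c =
      if hitB y t c x = true ∧ pvMine T t c = false then
        pvOmin (pvOsucc (pvGet2 g y x)) (pvGet2 g t c)
      else pvGet2 g t c := by
  have w1 : pvWF T.length (aJump T y x g (1, -2)) := aJump_wf hwf y x _
  have w2 : pvWF T.length (aJump T y x (aJump T y x g (1, -2)) (2, -1)) := aJump_wf w1 y x _
  have w3 : pvWF T.length (aJump T y x (aJump T y x (aJump T y x g (1, -2)) (2, -1)) (2, 1)) :=
    aJump_wf w2 y x _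
  have src1 : pvGet2 (aJump T y x g (1, -2)) y x = pvGet2 g y x := by
    rw [aJump_get hwf (1, -2) (by norm_num) hy hx, if_neg]; rintro ⟨h1, -⟩; omega
  have src2 : pvGet2 (aJump T y x (aJump T y x g (1, -2)) (2, -1)) y x =
      pvGet2 (aJump T y x g (1, -2)) y x := by
    rw [aJump_get w1 (2, -1) (by norm_num) hy hx, if_neg]; rintro ⟨h1, -⟩; omega
  have src3 : pvGet2 (aJump T y x (aJump T y x (aJump T y x g (1, -2)) (2, -1)) (2, 1)) y x =
      pvGet2 (aJump T y x (aJump T y x g (1, -2)) (2, -1)) y x := by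
    rw [aJump_get w2 (2, 1) (by norm_num) hy hx, if_neg]; rintro ⟨h1, -⟩; omega
  unfold aInner pvSkoki
  simp only [List.foldl]
  rw [aJump_get w3 (1, 2) (by norm_num) ht hc,
      aJump_get w2 (2, 1) (by norm_num) ht hc,
      aJump_get w1 (2, -1) (by norm_num) ht hc,
      aJump_get hwf (1, -2) (by norm_num) ht hc,
      src3, src2, src1]
  by_cases hm : pvMine T t c = false
  · simp only [hm, and_true]
    simp only [hitB, Bool.or_eq_true, Bool.and_eq_true, beq_iff_eq]
    split_ifs <;> first | rfl | omega
  · have hm' : pvMine T t c = true := by revert hm; cases pvMine T t c <;> simp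
    simp [hm']

-- the inner fold over a list of source columns, pointwise
theorem aInner_fold {T : List (List Int)} {y : Nat} (xs : List Nat) (g : List (List (Option Int)))
    (hwf : pvWF T.length g) (hxs : ∀ x ∈ xs, x < T.length) (hy : y < T.length) :
    pvWF T.length (xs.foldl (aInner T y) g) ∧
    ∀ t c, t < T.length → c < T.length →
      pvGet2 (xs.foldl (aInner T y) g) t c =
        xs.foldl (fun v x =>
          if hitB y t c x = true ∧ pvMine T t c = false then
            pvOmin (pvOsucc (pvGet2 g y x)) v
          else v) (pvGet2 g t c) := by
  induction xs generalizing g with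
  | nil => exact ⟨hwf, fun t c _ _ => rfl⟩
  | cons x xs ih =>
    have hx : x < T.length := hxs x List.mem_cons_self
    have hwf' : pvWF T.length (aInner T y g x) := aInner_wf hwf y x
    obtain ⟨wf2, hval⟩ := ih (aInner T y g x) hwf' (fun z hz => hxs z (List.mem_cons_of_mem _ hz))
    refine ⟨wf2, ?_⟩
    intro t c ht hc
    have hsrc : ∀ j, j < T.length → pvGet2 (aInner T y g x) y j = pvGet2 g y j := by
      intro j hj
      rw [aInner_get hwf hy hx hy hj, if_neg]
      rintro ⟨h1, -⟩
      simp only [hitB, Bool.or_eq_true, Bool.and_eq_true, beq_iff_eq] at h1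
      omega
    rw [List.foldl_cons, List.foldl_cons, hval t c ht hc,
      aInner_get hwf hy hx ht hc]
    refine PySem.List.foldl_congr_mem _ _ _ _ ?_
    intro v z hz
    rw [hsrc z (hxs z (List.mem_cons_of_mem _ hz))]

-- folds that fire on at most two indices of a range
theorem foldl_one_hit {β : Type} (n a : Nat) (f : Nat → β → β) (v : β) :
    (List.range n).foldl (fun v x => if x = a then f x v else v) v =
      (if a < n then f a else id) v := by
  induction n with
  | zero => simp
  | succ n ih =>
    rw [List.range_succ, List.foldl_append, ih]
    simp only [List.foldl_cons, List.foldl_nil]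
    by_cases hna : n = a
    · subst hna
      simp [Nat.lt_irrefl, Nat.lt_succ_self]
    · simp [hna, show (a < n + 1) ↔ (a < n) from by omega]

theorem foldl_two_hits {β : Type} (n a b : Nat) (hab : a < b) (f : Nat → β → β) (v : β) :
    (List.range n).foldl (fun v x => if x = a ∨ x = b then f x v else v) v =
      (if b < n then f b else id) ((if a < n then f a else id) v) := by
  induction n with
  | zero => simp
  | succ n ih =>
    rw [List.range_succ, List.foldl_append, ih]
    simp only [List.foldl_cons, List.foldl_nil]
    by_cases hnb : n = b
    · subst hnb
      simp [hab, Nat.lt_irrefl, Nat.lt_succ_self, show a < n + 1 from by omega]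
    · by_cases hna : n = a
      · subst hna
        simp [Nat.lt_irrefl, Nat.lt_succ_self, hnb, show ¬ b < n from by omega,
          show ¬ b < n + 1 from by omega]
      · simp [hna, hnb, show (a < n + 1) ↔ (a < n) from by omega,
          show (b < n + 1) ↔ (b < n) from by omega]

theorem foldl_no_hit {β : Type} {α : Type} (xs : List α) (v : β) :
    xs.foldl (fun v _ => v) v = v := by
  induction xs with
  | nil => rfl
  | cons x xs ih => exact ih

-- one full pass of the outer loop (source row y), pointwise
theorem aOuter_get {T : List (List Int)} {g : List (List (Option Int))}
    (hwf : pvWF T.length g) {y t c : Nat}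
    (hy : y < T.length) (ht : t < T.length) (hc : c < T.length) :
    pvGet2 (aOuter T g y) t c =
      if t = y + 1 then
        (if pvMine T t c = false then
          pvOmin (if c + 2 < T.length then pvOsucc (pvGet2 g y (c + 2)) else none)
            (pvOmin (if 2 ≤ c then pvOsucc (pvGet2 g y (c - 2)) else none) (pvGet2 g t c))
         else pvGet2 g t c)
      else if t = y + 2 then
        (if pvMine T t c = false then
          pvOmin (if c + 1 < T.length then pvOsucc (pvGet2 g y (c + 1)) else none)
            (pvOmin (if 1 ≤ c then pvOsucc (pvGet2 g y (c - 1)) else none) (pvGet2 g t c))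
         else pvGet2 g t c)
      else pvGet2 g t c := by
  obtain ⟨-, hval⟩ := aInner_fold (List.range T.length) g hwf (fun z hz => List.mem_range.1 hz) hy
  unfold aOuter
  rw [hval t c ht hc]
  by_cases hm : pvMine T t c = false
  swap
  · have hm' : pvMine T t c = true := by revert hm; cases pvMine T t c <;> simp
    have hid : (fun (v : Option Int) (x : Nat) =>
        if hitB y t c x = true ∧ pvMine T t c = false then
          pvOmin (pvOsucc (pvGet2 g y x)) v else v) = fun v _ => v := by
      funext v x; rw [if_neg]; simp [hm']
    rw [hid, foldl_no_hit]
    simp [hm']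
  · simp only [hm, and_true]
    by_cases ht1 : t = y + 1
    · subst ht1
      rw [if_pos rfl, if_pos trivial]
      by_cases hc2 : 2 ≤ c
      · have hfe : (fun (v : Option Int) (x : Nat) =>
            if hitB y (y + 1) c x = true then pvOmin (pvOsucc (pvGet2 g y x)) v else v) =
            fun v x => if x = c - 2 ∨ x = c + 2 then pvOmin (pvOsucc (pvGet2 g y x)) v else v := by
          funext v x
          have hcnd : ((x = c + 2 ∨ c = x + 2) ∨ y + 1 = y + 2 ∧ (x = c + 1 ∨ c = x + 1))
              = (x = c - 2 ∨ x = c + 2) := by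
            apply propext
            constructor
            · rintro ((h | h) | ⟨h, -⟩) <;> omega
            · rintro (h | h)
              · exact Or.inl (Or.inr (by omega))
              · exact Or.inl (Or.inl (by omega))
          simp only [hitB, Bool.or_eq_true, Bool.and_eq_true, beq_iff_eq, true_and, hcnd]
        rw [hfe, foldl_two_hits T.length (c - 2) (c + 2) (by omega),
          if_pos (by omega : c - 2 < T.length), if_pos hc2]
        by_cases hcn : c + 2 < T.length
        · rw [if_pos hcn, if_pos hcn]
        · rw [if_neg hcn, if_neg hcn]; rfl
      · have hfe : (fun (v : Option Int) (x : Nat) =>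
            if hitB y (y + 1) c x = true then pvOmin (pvOsucc (pvGet2 g y x)) v else v) =
            fun v x => if x = c + 2 then pvOmin (pvOsucc (pvGet2 g y x)) v else v := by
          funext v x
          have hcnd : ((x = c + 2 ∨ c = x + 2) ∨ y + 1 = y + 2 ∧ (x = c + 1 ∨ c = x + 1))
              = (x = c + 2) := by
            apply propext
            constructor
            · rintro ((h | h) | ⟨h, -⟩) <;> omega
            · intro h
              exact Or.inl (Or.inl (by omega))
          simp only [hitB, Bool.or_eq_true, Bool.and_eq_true, beq_iff_eq, true_and, hcnd]
        rw [hfe, foldl_one_hit T.length (c + 2), if_neg (by omega : ¬ 2 ≤ c)]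
        by_cases hcn : c + 2 < T.length
        · rw [if_pos hcn, if_pos hcn]; rfl
        · rw [if_neg hcn, if_neg hcn]; rfl
    · by_cases ht2 : t = y + 2
      · subst ht2
        rw [if_neg (by omega), if_pos rfl, if_pos trivial]
        by_cases hc1 : 1 ≤ c
        · have hfe : (fun (v : Option Int) (x : Nat) =>
              if hitB y (y + 2) c x = true then pvOmin (pvOsucc (pvGet2 g y x)) v else v) =
              fun v x => if x = c - 1 ∨ x = c + 1 then pvOmin (pvOsucc (pvGet2 g y x)) v else v := by
            funext v x
            have hcnd : (y + 2 = y + 1 ∧ (x = c + 2 ∨ c = x + 2) ∨ (x = c + 1 ∨ c = x + 1))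
                = (x = c - 1 ∨ x = c + 1) := by
              apply propext
              constructor
              · rintro (⟨h, -⟩ | (h | h)) <;> omega
              · rintro (h | h)
                · exact Or.inr (Or.inr (by omega))
                · exact Or.inr (Or.inl (by omega))
            simp only [hitB, Bool.or_eq_true, Bool.and_eq_true, beq_iff_eq, true_and, hcnd]
          rw [hfe, foldl_two_hits T.length (c - 1) (c + 1) (by omega),
            if_pos (by omega : c - 1 < T.length), if_pos hc1]
          by_cases hcn : c + 1 < T.length
          · rw [if_pos hcn, if_pos hcn]
          · rw [if_neg hcn, if_neg hcn]; rfl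
        · have hfe : (fun (v : Option Int) (x : Nat) =>
              if hitB y (y + 2) c x = true then pvOmin (pvOsucc (pvGet2 g y x)) v else v) =
              fun v x => if x = c + 1 then pvOmin (pvOsucc (pvGet2 g y x)) v else v := by
            funext v x
            have hcnd : (y + 2 = y + 1 ∧ (x = c + 2 ∨ c = x + 2) ∨ (x = c + 1 ∨ c = x + 1))
                = (x = c + 1) := by
              apply propext
              constructor
              · rintro (⟨h, -⟩ | (h | h)) <;> omega
              · intro h
                exact Or.inr (Or.inl (by omega))
            simp only [hitB, Bool.or_eq_true, Bool.and_eq_true, beq_iff_eq, true_and, hcnd]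
          rw [hfe, foldl_one_hit T.length (c + 1), if_neg (by omega : ¬ 1 ≤ c)]
          by_cases hcn : c + 1 < T.length
          · rw [if_pos hcn, if_pos hcn]; rfl
          · rw [if_neg hcn, if_neg hcn]; rfl
      · have hfe : (fun (v : Option Int) (x : Nat) =>
            if hitB y t c x = true then pvOmin (pvOsucc (pvGet2 g y x)) v else v) =
            fun v _ => v := by
          funext v x
          rw [if_neg]
          simp only [hitB, Bool.or_eq_true, Bool.and_eq_true, beq_iff_eq]
          rintro (⟨h, -⟩ | ⟨h, -⟩) <;> omega
        rw [hfe, foldl_no_hit, if_neg ht1, if_neg ht2]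


theorem aOuter_wf {T : List (List Int)} {g : List (List (Option Int))}
    (hwf : pvWF T.length g) (y : Nat) (hy : y < T.length) : pvWF T.length (aOuter T g y) :=
  (aInner_fold (List.range T.length) g hwf (fun z hz => List.mem_range.1 hz) hy).1

-- ---- the common mathematical description of the distance table, in B's shape ----
def pvCellAux (N : Nat) (q : Option (Nat → Option Int)) (p : Nat → Option Int)
    (mine : Bool) (x : Nat) : Option Int :=
  if mine then none
  else
    let b : Option Int := none
    let b := if x + 2 < N then pvOmin b (pvOsucc (p (x + 2))) else b
    let b := if 2 ≤ x then pvOmin b (pvOsucc (p (x - 2))) else b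
    match q with
    | none => b
    | some q =>
      let b := if x + 1 < N then pvOmin b (pvOsucc (q (x + 1))) else b
      if 1 ≤ x then pvOmin b (pvOsucc (q (x - 1))) else b

def Dspec (T : List (List Int)) : Nat → Nat → Option Int
  | 0, _ => some 0
  | 1, x => pvCellAux T.length none (Dspec T 0) (pvMine T 1 x) x
  | y + 2, x => pvCellAux T.length (some (Dspec T y)) (Dspec T (y + 1)) (pvMine T (y + 2) x) x

-- row k+1 after source rows 0..k-1 have been processed (k ≥ 1): only the dy = 2 jumps arrived
def partialD (T : List (List Int)) (k c : Nat) : Option Int :=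
  if pvMine T (k + 1) c = false then
    pvOmin (if c + 1 < T.length then pvOsucc (Dspec T (k - 1) (c + 1)) else none)
      (pvOmin (if 1 ≤ c then pvOsucc (Dspec T (k - 1) (c - 1)) else none) none)
  else none

-- the grid after k passes of A's outer loop
def gridA (T : List (List Int)) (k t c : Nat) : Option Int :=
  if t ≤ k then Dspec T t c
  else if t = k + 1 ∧ 1 ≤ k then partialD T k c
  else if t = 0 then some 0 else none

-- the guarded-contribution form of pvCellAux
theorem pvCellAux_omin (N : Nat) (q : Option (Nat → Option Int)) (p : Nat → Option Int) (x : Nat) :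
    pvCellAux N q p false x =
      match q with
      | none =>
        pvOmin (if x + 2 < N then pvOsucc (p (x + 2)) else none)
          (if 2 ≤ x then pvOsucc (p (x - 2)) else none)
      | some qq =>
        pvOmin (pvOmin (pvOmin (if x + 2 < N then pvOsucc (p (x + 2)) else none)
          (if 2 ≤ x then pvOsucc (p (x - 2)) else none))
          (if x + 1 < N then pvOsucc (qq (x + 1)) else none))
          (if 1 ≤ x then pvOsucc (qq (x - 1)) else none) := by
  unfold pvCellAux
  rw [if_neg (by simp)]
  cases q <;> dsimp only <;> rw [pvOmin_guard, pvOmin_guard] <;> try rw [pvOmin_guard, pvOmin_guard]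
  · rfl
  · rfl

-- one pass of A's outer loop advances gridA by one stage
theorem stepA (T : List (List Int)) (g : List (List (Option Int))) (k : Nat)
    (hwf : pvWF T.length g) (hkN : k < T.length)
    (hg : ∀ t c, t < T.length → c < T.length → pvGet2 g t c = gridA T k t c) :
    ∀ t c, t < T.length → c < T.length → pvGet2 (aOuter T g k) t c = gridA T (k + 1) t c := by
  intro t c ht hc
  rw [aOuter_get hwf hkN ht hc]
  by_cases ht1 : t = k + 1
  · subst ht1
    rw [if_pos rfl]
    have hA1 : (if c + 2 < T.length then pvOsucc (pvGet2 g k (c + 2)) else none)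
        = (if c + 2 < T.length then pvOsucc (Dspec T k (c + 2)) else none) := by
      split
      · rw [hg k (c + 2) hkN (by omega)]; unfold gridA; rw [if_pos (le_refl k)]
      · rfl
    have hA2 : (if 2 ≤ c then pvOsucc (pvGet2 g k (c - 2)) else none)
        = (if 2 ≤ c then pvOsucc (Dspec T k (c - 2)) else none) := by
      split
      · rw [hg k (c - 2) hkN (by omega)]; unfold gridA; rw [if_pos (le_refl k)]
      · rfl
    have hold : pvGet2 g (k + 1) c = gridA T k (k + 1) c := hg _ _ ht hc
    have hgoal : gridA T (k + 1) (k + 1) c = Dspec T (k + 1) c := by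
      unfold gridA; rw [if_pos (le_refl (k + 1))]
    rw [hgoal]
    by_cases hm : pvMine T (k + 1) c = false
    · rw [if_pos hm, hold, hA1, hA2]
      cases k with
      | zero =>
        rw [show gridA T 0 (0 + 1) c = none from by
          unfold gridA; rw [if_neg (by omega), if_neg (by omega), if_neg (by omega)]]
        rw [show Dspec T (0 + 1) c = pvCellAux T.length none (Dspec T 0) (pvMine T (0 + 1) c) c
          from rfl, hm, pvCellAux_omin]
        rw [pvOmin_none_right]
      | succ k' =>
        rw [show gridA T (k' + 1) (k' + 1 + 1) c = partialD T (k' + 1) c from by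
          unfold gridA; rw [if_neg (by omega), if_pos ⟨rfl, by omega⟩]]
        unfold partialD
        rw [show k' + 1 + 1 = k' + 2 from rfl] at hm ⊢
        rw [if_pos hm, pvOmin_none_right]
        rw [show Dspec T (k' + 2) c
            = pvCellAux T.length (some (Dspec T k')) (Dspec T (k' + 1)) (pvMine T (k' + 2) c) c
          from rfl, hm, pvCellAux_omin]
        rw [show k' + 1 - 1 = k' from rfl]
        exact omin4 _ _ _ _
    · have hm' : pvMine T (k + 1) c = true := by revert hm; cases pvMine T (k + 1) c <;> simp
      rw [if_neg (by simp [hm']), hold]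
      cases k with
      | zero =>
        rw [show gridA T 0 (0 + 1) c = none from by
          unfold gridA; rw [if_neg (by omega), if_neg (by omega), if_neg (by omega)]]
        rw [show Dspec T (0 + 1) c = pvCellAux T.length none (Dspec T 0) (pvMine T (0 + 1) c) c
          from rfl, hm']
        rfl
      | succ k' =>
        rw [show gridA T (k' + 1) (k' + 1 + 1) c = partialD T (k' + 1) c from by
          unfold gridA; rw [if_neg (by omega), if_pos ⟨rfl, by omega⟩]]
        unfold partialD
        rw [show k' + 1 + 1 = k' + 2 from rfl] at hm' ⊢
        rw [if_neg (by simp [hm'])]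
        rw [show Dspec T (k' + 2) c
            = pvCellAux T.length (some (Dspec T k')) (Dspec T (k' + 1)) (pvMine T (k' + 2) c) c
          from rfl, hm']
        rfl
  · by_cases ht2 : t = k + 2
    · subst ht2
      rw [if_neg ht1, if_pos rfl]
      have hB1 : (if c + 1 < T.length then pvOsucc (pvGet2 g k (c + 1)) else none)
          = (if c + 1 < T.length then pvOsucc (Dspec T k (c + 1)) else none) := by
        split
        · rw [hg k (c + 1) hkN (by omega)]; unfold gridA; rw [if_pos (le_refl k)]
        · rfl
      have hB2 : (if 1 ≤ c then pvOsucc (pvGet2 g k (c - 1)) else none)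
          = (if 1 ≤ c then pvOsucc (Dspec T k (c - 1)) else none) := by
        split
        · rw [hg k (c - 1) hkN (by omega)]; unfold gridA; rw [if_pos (le_refl k)]
        · rfl
      have hold : pvGet2 g (k + 2) c = none := by
        rw [hg (k + 2) c ht hc]
        unfold gridA
        rw [if_neg (by omega), if_neg (by omega), if_neg (by omega)]
      have hgoal : gridA T (k + 1) (k + 2) c = partialD T (k + 1) c := by
        unfold gridA; rw [if_neg (by omega), if_pos ⟨by omega, by omega⟩]
      rw [hgoal]
      unfold partialD
      rw [show k + 1 + 1 = k + 2 from rfl, show k + 1 - 1 = k from rfl]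
      by_cases hm : pvMine T (k + 2) c = false
      · rw [if_pos hm, if_pos hm, hold, hB1, hB2]
      · have hm' : pvMine T (k + 2) c = true := by revert hm; cases pvMine T (k + 2) c <;> simp
        rw [if_neg (by simp [hm']), if_neg (by simp [hm']), hold]
    · rw [if_neg ht1, if_neg ht2, hg t c ht hc]
      unfold gridA
      by_cases htk : t ≤ k
      · rw [if_pos htk, if_pos (by omega)]
      · rw [if_neg htk, if_neg (by omega : ¬ (t = k + 1 ∧ 1 ≤ k)),
          if_neg (by omega : ¬ t = 0), if_neg (by omega : ¬ t ≤ k + 1),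
          if_neg (by omega : ¬ (t = k + 1 + 1 ∧ 1 ≤ k + 1))]

theorem outer_inv (T : List (List Int)) (k : Nat) (hk : k ≤ T.length - 1) :
    pvWF T.length ((List.range k).foldl (aOuter T)
        ((List.range T.length).map (fun i => (List.range T.length).map
          (fun _ => if 0 < i then (none : Option Int) else some 0)))) ∧
    ∀ t c, t < T.length → c < T.length →
      pvGet2 ((List.range k).foldl (aOuter T)
        ((List.range T.length).map (fun i => (List.range T.length).map
          (fun _ => if 0 < i then (none : Option Int) else some 0)))) t c = gridA T k t c := by
  induction k with
  | zero =>
    simp only [List.range_zero, List.foldl_nil]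
    constructor
    · refine ⟨by simp, ?_⟩
      intro i hi
      rw [List.getD_eq_getElem?_getD, List.getElem?_eq_getElem (by simp [hi])]
      simp
    · intro t c ht hc
      unfold pvGet2
      rw [PySem.List.getD_map_range _ _ _ _ ht, PySem.List.getD_map_range _ _ _ _ hc]
      by_cases t0 : 0 < t
      · rw [if_pos t0]
        unfold gridA
        rw [if_neg (by omega), if_neg (by omega), if_neg (by omega)]
      · have ht0 : t = 0 := by omega
        subst ht0
        rw [if_neg (by omega)]
        unfold gridA
        rw [if_pos (by omega)]
        rfl
  | succ k ih =>
    obtain ⟨wfk, hvk⟩ := ih (by omega)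
    have hkN : k < T.length := by omega
    rw [List.range_succ, List.foldl_append, List.foldl_cons, List.foldl_nil]
    exact ⟨aOuter_wf wfk k hkN, stepA T _ k wfk hkN hvk⟩

-- ---- B side ----
-- the value appended for cell (y, x)
def bCellVal (T : List (List Int)) (prev2 : Option (List (Option Int))) (prev : List (Option Int))
    (y x : Nat) : Option Int :=
  if pvMine T y x then none
  else
    let best : Option Int := none
    let best := if x + 2 < T.length then pvOmin best (pvOsucc (prev.getD (x + 2) none)) else best
    let best := if 2 ≤ x then pvOmin best (pvOsucc (prev.getD (x - 2) none)) else best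
    match prev2 with
    | none => best
    | some q =>
      let best := if x + 1 < T.length then pvOmin best (pvOsucc (q.getD (x + 1) none)) else best
      if 1 ≤ x then pvOmin best (pvOsucc (q.getD (x - 1) none)) else best

theorem bRowStep_eq (T : List (List Int)) (p2 : Option (List (Option Int))) (p : List (Option Int))
    (y : Nat) (row : List (Option Int)) (x : Nat) :
    bRowStep T p2 p y row x = row ++ [bCellVal T p2 p y x] := by
  unfold bRowStep bCellVal
  split <;> rfl

theorem bRow_map (T : List (List Int)) (p2 : Option (List (Option Int))) (p : List (Option Int))
    (y : Nat) :
    (List.range T.length).foldl (bRowStep T p2 p y) [] =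
      (List.range T.length).map (bCellVal T p2 p y) := by
  have hfe : bRowStep T p2 p y = fun row x => row ++ [bCellVal T p2 p y x] := by
    funext row x; exact bRowStep_eq T p2 p y row x
  rw [hfe]
  simpa using PySem.List.foldl_append_singleton_eq_map (bCellVal T p2 p y) (List.range T.length) []

theorem bCellVal_map (T : List (List Int)) (qo : Option (Nat → Option Int)) (pf : Nat → Option Int)
    (y x : Nat) (hx : x < T.length) :
    bCellVal T (qo.map (fun qf => (List.range T.length).map qf)) ((List.range T.length).map pf) y x =
      pvCellAux T.length qo pf (pvMine T y x) x := by
  unfold bCellVal pvCellAux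
  cases hm : pvMine T y x
  · rw [if_neg (by simp), if_neg (by simp)]
    cases qo with
    | none =>
      dsimp only [Option.map_none]
      have h1 : (if x + 2 < T.length then
          pvOmin none (pvOsucc (((List.range T.length).map pf).getD (x + 2) none)) else none)
          = (if x + 2 < T.length then pvOmin none (pvOsucc (pf (x + 2))) else none) := by
        split
        · rw [PySem.List.getD_map_range _ _ _ _ (by omega)]
        · rfl
      rw [h1]
      have h2 : ∀ b : Option Int, (if 2 ≤ x then
          pvOmin b (pvOsucc (((List.range T.length).map pf).getD (x - 2) none)) else b)
          = (if 2 ≤ x then pvOmin b (pvOsucc (pf (x - 2))) else b) := by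
        intro b; split
        · rw [PySem.List.getD_map_range _ _ _ _ (by omega)]
        · rfl
      rw [h2]
    | some qf =>
      dsimp only [Option.map_some]
      have h1 : (if x + 2 < T.length then
          pvOmin none (pvOsucc (((List.range T.length).map pf).getD (x + 2) none)) else none)
          = (if x + 2 < T.length then pvOmin none (pvOsucc (pf (x + 2))) else none) := by
        split
        · rw [PySem.List.getD_map_range _ _ _ _ (by omega)]
        · rfl
      rw [h1]
      have h2 : ∀ b : Option Int, (if 2 ≤ x then
          pvOmin b (pvOsucc (((List.range T.length).map pf).getD (x - 2) none)) else b)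
          = (if 2 ≤ x then pvOmin b (pvOsucc (pf (x - 2))) else b) := by
        intro b; split
        · rw [PySem.List.getD_map_range _ _ _ _ (by omega)]
        · rfl
      rw [h2]
      have h3 : ∀ b : Option Int, (if x + 1 < T.length then
          pvOmin b (pvOsucc (((List.range T.length).map qf).getD (x + 1) none)) else b)
          = (if x + 1 < T.length then pvOmin b (pvOsucc (qf (x + 1))) else b) := by
        intro b; split
        · rw [PySem.List.getD_map_range _ _ _ _ (by omega)]
        · rfl
      rw [h3]
      have h4 : ∀ b : Option Int, (if 1 ≤ x then
          pvOmin b (pvOsucc (((List.range T.length).map qf).getD (x - 1) none)) else b)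
          = (if 1 ≤ x then pvOmin b (pvOsucc (qf (x - 1))) else b) := by
        intro b; split
        · rw [PySem.List.getD_map_range _ _ _ _ (by omega)]
        · rfl
      rw [h4]
  · rw [if_pos rfl, if_pos rfl]

theorem bFold (T : List (List Int)) (m : Nat) :
    (List.range' 1 m).foldl (bStep T) (none, List.replicate T.length (some 0)) =
      (if m = 0 then none else some ((List.range T.length).map (Dspec T (m - 1))),
       (List.range T.length).map (Dspec T m)) := by
  induction m with
  | zero =>
    simp only [List.range'_zero, List.foldl_nil]
    rw [if_pos (by trivial)]
    rw [show (List.range T.length).map (Dspec T 0) = List.replicate T.length (some (0 : Int)) from by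
      rw [show Dspec T 0 = Function.const Nat (some (0 : Int)) from rfl, List.map_const,
        List.length_range]]
  | succ m ih =>
    rw [List.range'_1_concat, List.foldl_append, ih, List.foldl_cons, List.foldl_nil]
    unfold bStep
    dsimp only
    rw [bRow_map]
    simp only [Prod.mk.injEq]
    constructor
    · rw [if_neg (by omega)]
      rw [show m + 1 - 1 = m from rfl]
    · cases m with
      | zero =>
        rw [if_pos rfl]
        refine List.map_congr_left ?_
        intro x hx
        have h := bCellVal_map T none (Dspec T 0) (1 + 0) x (List.mem_range.1 hx)
        simpa [Dspec] using h
      | succ m' =>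
        rw [if_neg (by omega)]
        refine List.map_congr_left ?_
        intro x hx
        have h := bCellVal_map T (some (Dspec T (m' + 1 - 1))) (Dspec T (m' + 1)) (1 + (m' + 1)) x
          (List.mem_range.1 hx)
        simpa [Dspec, show m' + 1 - 1 = m' from rfl, show 1 + (m' + 1) = m' + 2 from by omega,
          show m' + 1 + 1 = m' + 2 from rfl] using h

-- ===== VERDICT (by name: the statement is the Claim_ definition above) =====
theorem Zadanie_112_spec : Claim_equal_Zadanie_112 := by
  intro T _dom _pre
  unfold Spec_Zadanie_112 Zadanie_112 Zadanie_112_alt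
  by_cases hN : T.length = 0
  · have hT : T = [] := by
      cases T with
      | nil => rfl
      | cons a l => simp at hN
    subst hT
    rfl
  · dsimp only
    obtain ⟨wfF, hvF⟩ := outer_inv T (T.length - 1) (le_refl _)
    rw [bFold T (T.length - 1)]
    rw [PySem.List.foldl_congr_mem (List.range T.length) _
      (fun r i => pvOmin r (Dspec T (T.length - 1) i)) none ?hcong]
    case hcong =>
      intro r i hi
      rw [hvF (T.length - 1) i (by omega) (List.mem_range.1 hi)]
      rw [show gridA T (T.length - 1) (T.length - 1) i = Dspec T (T.length - 1) i from by
        unfold gridA; rw [if_pos (le_refl _)]]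
      exact pvOmin_comm _ _
    rw [List.foldl_map]
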